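-- pv_equiv track=rewrite | github.com/Energy-CeRBeR/algorithms_RSREU | binary_search/K.py | get_max_count
-- ===== SOURCE A (Python) =====
-- def get_max_count(worker, mx_time):
--     days = 0
--     while (mx_time >= worker[0]):
--         mx_time -= worker[0]
--         days += 1
--         if days % worker[1] == 0:
--             mx_time -= worker[2]
--
--     return days
-- ===== SOURCE B (Python) =====
-- def get_max_count(worker, mx_time):
--     cost, period, bonus = worker[0], worker[1], worker[2]
--     if mx_time < cost:
--         return 0
--     block = period * cost + bonus        # time one full bonus period consumes
--     k = (mx_time + bonus) // block       # complete bonus periods that fit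
--     rem = mx_time - k * block            # budget left for the final, partial period
--     return k * period + max(0, rem // cost)
-- ===== Notes on version B (the rewrite author's own statement) =====
-- stated objective: alternative
-- what changed: B replaces A's day-by-day simulation loop with closed-form arithmetic (complete bonus periods via one integer division, remaining days via a second division; intended as asymptotically faster, though a timing run could not confirm a ratio since A times out where B returns); Pre_ keeps the natural domain (at least 3 entries, positive cost, positive period length, nonnegative bonus) plus the under-budget case, excluding inputs where A raises, loops forever, returns 0 on a short worker list B cannot even read, or returns accidental values for negative period lengths / negative bonuses.
-- outside the precondition, e.g. on get_max_count([1, -2, 0], 3): A returns 3, B returns 4; on get_max_count([5, 1, -2], 12): A returns 3, B returns 3; on get_max_count([7], 3): A returns 0, B raises IndexError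
import Mathlib
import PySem

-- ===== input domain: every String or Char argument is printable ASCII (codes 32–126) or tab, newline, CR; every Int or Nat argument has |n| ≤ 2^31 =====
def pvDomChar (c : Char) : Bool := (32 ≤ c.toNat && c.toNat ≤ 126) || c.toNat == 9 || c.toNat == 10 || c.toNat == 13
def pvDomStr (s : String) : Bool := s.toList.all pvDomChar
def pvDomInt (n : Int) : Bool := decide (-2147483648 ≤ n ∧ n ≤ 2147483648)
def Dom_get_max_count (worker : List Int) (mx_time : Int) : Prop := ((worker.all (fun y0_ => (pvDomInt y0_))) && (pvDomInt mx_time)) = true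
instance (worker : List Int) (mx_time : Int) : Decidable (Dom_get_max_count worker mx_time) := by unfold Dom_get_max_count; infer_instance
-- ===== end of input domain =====

-- B replaces A's day-by-day simulation loop with closed-form arithmetic: complete bonus
-- periods via one integer division, then the partial-period remainder.

-- ===== PORT A =====
-- the while-loop of A; fuel only makes it total (inside Pre_ the fuel is never exhausted)
def pvLoopA (c p b : Int) : Nat → Int → Int → Int
  | 0, _, days => days
  | fuel+1, mx_time, days =>
    if mx_time ≥ c then
      let mx1 := mx_time - c
      let days1 := days + 1
      let mx2 := if PySem.Int.mod days1 p = 0 then mx1 - b else mx1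
      pvLoopA c p b fuel mx2 days1
    else days

def get_max_count (worker : List Int) (mx_time : Int) : Int :=
  let c := (PySem.List.pyGet? worker 0).getD 0
  let p := (PySem.List.pyGet? worker 1).getD 0
  let b := (PySem.List.pyGet? worker 2).getD 0
  pvLoopA c p b (mx_time.toNat + 1) mx_time 0

-- ===== PORT B =====
def get_max_count_alt (worker : List Int) (mx_time : Int) : Int :=
  let cost := (PySem.List.pyGet? worker 0).getD 0
  let period := (PySem.List.pyGet? worker 1).getD 0
  let bonus := (PySem.List.pyGet? worker 2).getD 0
  if mx_time < cost then 0
  else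
    let block := period * cost + bonus
    let k := PySem.Int.floordiv (mx_time + bonus) block
    let rem := mx_time - k * block
    k * period + max 0 (PySem.Int.floordiv rem cost)

-- ===== PRECONDITION & SPEC =====
-- Pre_ admits the natural domain (≥ 3 entries, positive daily cost, positive bonus-period
-- length, nonnegative bonus) plus the trivial under-budget case; it excludes inputs where A
-- raises (empty worker; worker[1] == 0; len(worker) < 3 once the loop runs), loops forever
-- (cost < 1, or a bonus refilling the budget), returns 0 on a short worker list that B
-- cannot even read (B needs worker[1], worker[2]), or returns accidental values on negative
-- period lengths / negative bonuses that B's closed form does not reproduce.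
def Pre_get_max_count (worker : List Int) (mx_time : Int) : Prop :=
  3 ≤ worker.length ∧
  (mx_time < (PySem.List.pyGet? worker 0).getD 0 ∨
    (1 ≤ (PySem.List.pyGet? worker 0).getD 0 ∧ 1 ≤ (PySem.List.pyGet? worker 1).getD 0 ∧
      0 ≤ (PySem.List.pyGet? worker 2).getD 0))
instance (worker : List Int) (mx_time : Int) : Decidable (Pre_get_max_count worker mx_time) := by
  unfold Pre_get_max_count; infer_instance

def pvWitness_get_max_count : List Int × Int := ([3, 2, 1], 10)

def Spec_get_max_count (worker : List Int) (mx_time : Int) (out : Int) : Prop := out = get_max_count_alt worker mx_time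
instance (worker : List Int) (mx_time : Int) (out : Int) : Decidable (Spec_get_max_count worker mx_time out) := by unfold Spec_get_max_count; infer_instance

-- ===== CLAIM (what is proved, stated in full; the proofs are below) =====
def Claim_equal_get_max_count : Prop := ∀ (worker : List Int) (mx_time : Int), Dom_get_max_count worker mx_time → Pre_get_max_count worker mx_time → Spec_get_max_count worker mx_time (get_max_count worker mx_time)

-- ===== LEMMAS AND PROOFS =====

-- the loop returns immediately when the budget is below the daily cost
lemma pvLoopA_done (c p b : Int) (fuel : Nat) (mx d : Int) (h : mx < c) :
    pvLoopA c p b fuel mx d = d := by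
  cases fuel with
  | zero => rfl
  | succ f => simp [pvLoopA, not_le.mpr h]

-- j bonus-free iterations at the start of a period can be collapsed at once
lemma pvLoopA_skip (c p b : Int) (hc : 1 ≤ c) (hp : 1 ≤ p) :
    ∀ (j : Nat) (fuel : Nat) (mx d i : Int), j ≤ fuel → p ∣ (d - i) → 0 ≤ i →
      i + (j : Int) < p → (j : Int) * c ≤ mx →
      pvLoopA c p b fuel mx d = pvLoopA c p b (fuel - j) (mx - j * c) (d + j) := by
  intro j
  induction j with
  | zero => intro fuel mx d i _ _ _ _ _; simp
  | succ n ih =>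
    intro fuel mx d i hjf hdvd hi hlt hmul
    cases fuel with
    | zero => omega
    | succ f =>
      have hc0 : (0:Int) ≤ c := by omega
      have hnc : (0:Int) ≤ (n : Int) * c := mul_nonneg (by positivity) hc0
      have hguard : mx ≥ c := by push_cast at hmul; nlinarith
      have hnb : PySem.Int.mod (d + 1) p ≠ 0 := by
        rw [Ne, PySem.Int.mod_eq_zero_iff_dvd]
        intro hdvd1
        have h2 : p ∣ (i + 1) := by
          have h3 := dvd_sub hdvd1 hdvd
          simpa [show d + 1 - (d - i) = i + 1 by ring] using h3
        have h4 : p ≤ i + 1 := Int.le_of_dvd (by omega) h2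
        omega
      simp only [pvLoopA, if_pos hguard, if_neg hnb]
      have := ih f (mx - c) (d + 1) (i + 1) (by omega)
        (by simpa [show d + 1 - (i + 1) = d - i by ring] using hdvd)
        (by omega) (by push_cast at hlt ⊢; omega)
        (by push_cast at hmul ⊢; linarith)
      rw [this]
      congr 1
      · omega
      · push_cast; ring
      · push_cast; ring

-- the loop computes the closed form (ediv version), for any period-aligned start
lemma pvLoopA_closed (c p b : Int) (hc : 1 ≤ c) (hp : 1 ≤ p) (hb : 0 ≤ b) :
    ∀ (fuel : Nat) (mx d : Int), p ∣ d → mx.toNat ≤ fuel →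
      pvLoopA c p b fuel mx d =
        d + (if mx < c then 0 else
          ((mx + b) / (p * c + b)) * p +
            max 0 ((mx - ((mx + b) / (p * c + b)) * (p * c + b)) / c)) := by
  intro fuel
  induction fuel using Nat.strong_induction_on with
  | _ fuel IH =>
    intro mx d hdvd hfuel
    by_cases hlt : mx < c
    · rw [pvLoopA_done c p b fuel mx d hlt, if_pos hlt, add_zero]
    · push_neg at hlt
      have hper : 0 < p * c + b := by nlinarith
      rw [if_neg (not_lt.mpr hlt)]
      by_cases hbig : p * c ≤ mx
      · -- a full period completes: skip p - 1 bonus-free days, one bonus day, recurse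
        have hqmx : p ≤ mx := by nlinarith
        set j := (p - 1).toNat with hj
        have hjc : (j : Int) = p - 1 := by omega
        have hjf : j ≤ fuel := by omega
        rw [pvLoopA_skip c p b hc hp j fuel mx d 0 hjf (by simpa using hdvd) le_rfl
          (by omega) (by rw [hjc]; nlinarith)]
        obtain ⟨f, hf⟩ : ∃ f, fuel - j = f + 1 := ⟨fuel - j - 1, by omega⟩
        rw [hf]
        have hguard : mx - (j : Int) * c ≥ c := by rw [hjc]; nlinarith
        have hdq : p ∣ (d + (j : Int) + 1) := by
          rw [hjc, show d + (p - 1) + 1 = d + p by ring]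
          exact dvd_add hdvd dvd_rfl
        simp only [pvLoopA, if_pos hguard]
        rw [if_pos (show PySem.Int.mod (d + (j:Int) + 1) p = 0 from
          (PySem.Int.mod_eq_zero_iff_dvd _ _).mpr hdq)]
        have hmx2 : mx - (j:Int) * c - c - b = mx - (p * c + b) := by rw [hjc]; ring
        rw [hmx2]
        have hmx2q : mx - (p * c + b) ≤ mx - p := by nlinarith
        rw [IH f (by omega) (mx - (p * c + b)) (d + (j:Int) + 1) hdq (by omega)]
        have hk2 : (mx - (p * c + b) + b) / (p * c + b) = (mx + b) / (p * c + b) - 1 := by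
          rw [show mx - (p * c + b) + b = (mx + b) + (-1) * (p * c + b) by ring,
            Int.add_mul_ediv_right _ _ (by omega : p * c + b ≠ 0)]
          ring
        by_cases hsm : mx - (p * c + b) < c
        · rw [if_pos hsm]
          have hk1 : (mx + b) / (p * c + b) = 1 := by
            have h1 : 1 ≤ (mx + b) / (p * c + b) :=
              (Int.le_ediv_iff_mul_le hper).mpr (by nlinarith)
            have h2 : (mx + b) / (p * c + b) < 2 :=
              (Int.ediv_lt_iff_lt_mul hper).mpr (by nlinarith)
            omega
          have hrem : (mx - 1 * (p * c + b)) / c < 1 :=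
            (Int.ediv_lt_iff_lt_mul (by omega : (0:Int) < c)).mpr (by nlinarith)
          rw [hk1]
          have : max 0 ((mx - 1 * (p * c + b)) / c) = 0 := by omega
          rw [this]; rw [hjc]; ring
        · rw [if_neg hsm, hk2]
          have harg : mx - (p * c + b) - ((mx + b) / (p * c + b) - 1) * (p * c + b)
              = mx - ((mx + b) / (p * c + b)) * (p * c + b) := by ring
          rw [harg, hjc]; ring
      · -- no full period: k = 0, run mx / c bonus-free days and stop
        push_neg at hbig
        have hk0 : (mx + b) / (p * c + b) = 0 :=
          Int.ediv_eq_zero_of_lt (by omega) (by omega)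
        have hmod := Int.ediv_add_emod mx c
        have hmodnn := Int.emod_nonneg mx (by omega : c ≠ 0)
        have hmodlt := Int.emod_lt_of_pos mx (by omega : (0:Int) < c)
        have he1 : 1 ≤ mx / c := (Int.le_ediv_iff_mul_le (by omega : (0:Int) < c)).mpr (by omega)
        have heq : mx / c * c ≤ mx := by nlinarith
        have hep : mx / c < p := (Int.ediv_lt_iff_lt_mul (by omega : (0:Int) < c)).mpr (by omega)
        have hele : mx / c ≤ mx := Int.ediv_le_self c (by omega)
        set j := (mx / c).toNat with hj
        have hjc : (j : Int) = mx / c := by omega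
        rw [pvLoopA_skip c p b hc hp j fuel mx d 0 (by omega) (by simpa using hdvd) le_rfl
          (by omega) (by rw [hjc]; exact heq)]
        rw [pvLoopA_done c p b _ _ _ (by rw [hjc]; nlinarith)]
        rw [hk0]
        have : max 0 ((mx - 0 * (p * c + b)) / c) = mx / c := by
          simp only [zero_mul, sub_zero]; omega
        rw [this, hjc]; ring

-- ===== VERDICT (by name: the statement is the Claim_ definition above) =====
theorem get_max_count_spec : Claim_equal_get_max_count := by
  intro worker mx _ hpre
  unfold Spec_get_max_count
  simp only [get_max_count, get_max_count_alt]
  rcases hpre with ⟨hlen, hmx | ⟨hc, hp, hb⟩⟩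
  · rw [pvLoopA_done _ _ _ _ _ _ hmx, if_pos hmx]
  · rw [pvLoopA_closed _ _ _ hc hp hb _ mx 0 (dvd_zero _) (by omega), zero_add]
    by_cases h : mx < (PySem.List.pyGet? worker 0).getD 0
    · rw [if_pos h, if_pos h]
    · rw [if_neg h, if_neg h]
      have hper : 0 < (PySem.List.pyGet? worker 1).getD 0 * (PySem.List.pyGet? worker 0).getD 0
          + (PySem.List.pyGet? worker 2).getD 0 := by nlinarith
      rw [PySem.Int.floordiv_eq_ediv_of_pos hper,
        PySem.Int.floordiv_eq_ediv_of_pos (by omega : (0:Int) < (PySem.List.pyGet? worker 0).getD 0)]
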